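-- pv_equiv track=rewrite | github.com/maxhirsch/Exam-Conflicts | reduce_conflicts.py | pair_exams
-- ===== SOURCE A (Python) =====
-- def pair_exams(exams, num_pairs):
--     if num_pairs == 0:
--         return [exams]
--
--     pairings = []
--     for i in range(len(exams)):
--         for j in range(i+1, len(exams)):
--             other_pairings = pair_exams(exams[i+1:j] + exams[j+1:], num_pairs-1)
--             for p in other_pairings:
--                 pairings.append([exams[k] for k in range(i)] + [exams[i] + '_' + exams[j]] + p)
--
--     return pairings
-- ===== SOURCE B (Python) =====
-- def pair_exams(exams, num_pairs):
--     # Structural head recursion with a seen/remaining walker (no index loops).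
--     if num_pairs == 0:
--         return [exams]
--     if not exams:
--         return []
--     head, rest = exams[0], exams[1:]
--
--     def go(seen, remaining):
--         if not remaining:
--             return []
--         y, ys = remaining[0], remaining[1:]
--         here = [[head + '_' + y] + p
--                 for p in pair_exams(seen + ys, num_pairs - 1)]
--         return here + go(seen + [y], ys)
--
--     return go([], rest) + [[head] + p for p in pair_exams(rest, num_pairs)]
-- ===== Notes on version B (the rewrite author's own statement) =====
-- stated objective: alternative
-- what changed: Replaces A's (i,j) index double loop with slices and a per-result prefix comprehension by a purely structural head recursion: an inner seen/remaining walker pairs the first exam with each later one with no indexing at all, then the head is kept single and prepended to the recursive results.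
import Mathlib
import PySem

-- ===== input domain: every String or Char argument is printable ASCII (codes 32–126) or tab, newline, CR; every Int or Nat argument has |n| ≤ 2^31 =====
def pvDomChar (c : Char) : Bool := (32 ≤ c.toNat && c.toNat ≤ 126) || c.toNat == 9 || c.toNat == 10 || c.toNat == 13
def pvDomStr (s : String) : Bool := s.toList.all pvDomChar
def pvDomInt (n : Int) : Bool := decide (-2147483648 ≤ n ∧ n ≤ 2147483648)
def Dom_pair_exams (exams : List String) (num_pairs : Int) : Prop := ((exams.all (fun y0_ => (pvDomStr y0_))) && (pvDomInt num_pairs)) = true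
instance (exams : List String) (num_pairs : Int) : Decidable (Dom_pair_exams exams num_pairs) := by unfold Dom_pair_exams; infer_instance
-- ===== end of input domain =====

-- B replaces A's (i,j) index double loop (with its per-result prefix comprehension) by a
-- purely structural head recursion: a seen/remaining walker picks each partner for the
-- first exam (no indices, ranges or slices), then the head is kept single (objective:
-- alternative).

-- ===== PORT A =====
-- A's recursion is guarded by a fuel counter (exams.length + 1 always suffices: each
-- recursive call is on a list at least 2 shorter); the two for-loops are folds over
-- pyRange, exactly A's loop shape. Indices stay in range, so pyGetD is exact here.
def pairCore (fuel : Nat) (exams : List String) (num_pairs : Int) : List (List String) :=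
  match fuel with
  | 0 => []
  | fuel + 1 =>
    if num_pairs = 0 then [exams]
    else
      (PySem.List.pyRange 0 (PySem.List.len exams) 1).foldl (fun pairings i =>
        (PySem.List.pyRange (i+1) (PySem.List.len exams) 1).foldl (fun pairings j =>
          pairings ++
            (pairCore fuel
                (PySem.List.slice exams (some (i+1)) (some j) ++
                 PySem.List.slice exams (some (j+1)) none)
                (num_pairs - 1)).map
              (fun p =>
                (PySem.List.pyRange 0 i 1).map (fun k => PySem.List.pyGetD exams k "") ++
                [PySem.List.pyGetD exams i "" ++ "_" ++ PySem.List.pyGetD exams j ""] ++ p))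
          pairings)
        []

def pair_exams (exams : List String) (num_pairs : Int) : List (List String) :=
  pairCore (exams.length + 1) exams num_pairs

-- ===== PORT B =====
-- Source B's structural recursion: altGo is the inner walker go(seen, remaining); the
-- recursive pair_exams calls carry the same fuel guard (exams.length + 1 suffices:
-- the pairing recursion shortens the list by 2, the unpaired-head one by 1).
mutual
def altCore (fuel : Nat) (exams : List String) (num_pairs : Int) : List (List String) :=
  match fuel with
  | 0 => []
  | fuel + 1 =>
    if num_pairs = 0 then [exams]
    else
      match exams with
      | [] => []
      | head :: rest =>
        altGo fuel head num_pairs [] rest ++ (altCore fuel rest num_pairs).map (fun p => head :: p)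
termination_by (fuel, 0, 0)

def altGo (fuel : Nat) (head : String) (num_pairs : Int) (seen remaining : List String) : List (List String) :=
  match remaining with
  | [] => []
  | y :: ys =>
      (altCore fuel (seen ++ ys) (num_pairs - 1)).map (fun p => (head ++ "_" ++ y) :: p)
        ++ altGo fuel head num_pairs (seen ++ [y]) ys
termination_by (fuel, 1, remaining.length)
end

def pair_exams_alt (exams : List String) (num_pairs : Int) : List (List String) :=
  altCore (exams.length + 1) exams num_pairs

-- ===== PRECONDITION & SPEC =====
def Spec_pair_exams (exams : List String) (num_pairs : Int) (out : List (List String)) : Prop := out = pair_exams_alt exams num_pairs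
instance (exams : List String) (num_pairs : Int) (out : List (List String)) : Decidable (Spec_pair_exams exams num_pairs out) := by unfold Spec_pair_exams; infer_instance

-- ===== CLAIM (what is proved, stated in full; the proofs are below) =====
def Claim_equal_pair_exams : Prop := ∀ (exams : List String) (num_pairs : Int), Dom_pair_exams exams num_pairs → Spec_pair_exams exams num_pairs (pair_exams exams num_pairs)

-- ===== LEMMAS AND PROOFS =====

-- the body of A's innermost append, as a function of the two loop indices
def Ablock (exams : List String) (np : Int) (fuel : Nat) (i j : Int) : List (List String) :=
  (pairCore fuel
      (PySem.List.slice exams (some (i+1)) (some j) ++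
       PySem.List.slice exams (some (j+1)) none) (np - 1)).map
    (fun p =>
      (PySem.List.pyRange 0 i 1).map (fun k => PySem.List.pyGetD exams k "") ++
      [PySem.List.pyGetD exams i "" ++ "_" ++ PySem.List.pyGetD exams j ""] ++ p)

-- the contribution of partner index j in B's walker, in indexed form (proof device)
def Bblock (rest : List String) (np : Int) (fuel : Nat) (head : String) (j : Int) : List (List String) :=
  (altCore fuel
      (PySem.List.slice rest none (some j) ++
       PySem.List.slice rest (some (j+1)) none) (np - 1)).map
    (fun p => (head ++ "_" ++ PySem.List.pyGetD rest j "") :: p)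

theorem A_unfold (fuel : Nat) (exams : List String) (np : Int) (h0 : ¬ np = 0) :
    pairCore (fuel + 1) exams np =
      (PySem.List.pyRange 0 (exams.length : Int) 1).flatMap (fun i =>
        (PySem.List.pyRange (i+1) (exams.length : Int) 1).flatMap (fun j =>
          Ablock exams np fuel i j)) := by
  simp only [pairCore, if_neg h0, PySem.List.len_eq, Ablock]
  simp only [PySem.List.foldl_append_eq_flatMap]
  simp

-- index shift for ranges
theorem pyRange_shift (a b : Int) :
    PySem.List.pyRange (a+1) (b+1) 1 = (PySem.List.pyRange a b 1).map (fun t => t + 1) := by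
  rw [PySem.List.pyRange_one, PySem.List.pyRange_one, List.map_map]
  have h : (b + 1 - (a + 1)).toNat = (b - a).toNat := by omega
  rw [h]
  apply List.map_congr_left
  intro t _
  simp
  ring

-- slice/index shift facts over a cons, for nonnegative Int indices
theorem slice_shift_seg (x : String) (xs : List String) (i j : Int) (hi : 0 ≤ i) (hj : 0 ≤ j) :
    PySem.List.slice (x::xs) (some (i+1)) (some (j+1)) = PySem.List.slice xs (some i) (some j) := by
  obtain ⟨a, rfl⟩ := Int.eq_ofNat_of_zero_le hi
  obtain ⟨b, rfl⟩ := Int.eq_ofNat_of_zero_le hj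
  have e1 : ((a : Int) + 1) = ((a + 1 : Nat) : Int) := by push_cast; ring
  have e2 : ((b : Int) + 1) = ((b + 1 : Nat) : Int) := by push_cast; ring
  rw [e1, e2, PySem.List.slice_natCast, PySem.List.slice_natCast]
  simp

theorem slice_shift_tail (x : String) (xs : List String) (j : Int) (hj : 0 ≤ j) :
    PySem.List.slice (x::xs) (some (j+1)) none = PySem.List.slice xs (some j) none := by
  obtain ⟨b, rfl⟩ := Int.eq_ofNat_of_zero_le hj
  have e : ((b : Int) + 1) = ((b + 1 : Nat) : Int) := by push_cast; ring
  rw [e, PySem.List.slice_from_natCast, PySem.List.slice_from_natCast]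
  simp

theorem slice_shift_take (x : String) (xs : List String) (j : Int) (hj : 0 ≤ j) :
    PySem.List.slice (x::xs) none (some (j+1)) = x :: PySem.List.slice xs none (some j) := by
  obtain ⟨b, rfl⟩ := Int.eq_ofNat_of_zero_le hj
  have e : ((b : Int) + 1) = ((b + 1 : Nat) : Int) := by push_cast; ring
  rw [e, PySem.List.slice_to_natCast, PySem.List.slice_to_natCast]
  simp

theorem pyGetD_cons_shift (x : String) (xs : List String) (j : Int) (hj : 0 ≤ j) :
    PySem.List.pyGetD (x::xs) (j+1) "" = PySem.List.pyGetD xs j "" := by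
  obtain ⟨b, rfl⟩ := Int.eq_ofNat_of_zero_le hj
  have e : ((b : Int) + 1) = ((b + 1 : Nat) : Int) := by push_cast; ring
  rw [e, PySem.List.pyGetD_natCast, PySem.List.pyGetD_natCast]
  simp [List.getD]

-- the prefix comprehension [exams[k] for k in range(i)] shifts over a cons
theorem prefix_shift (x : String) (xs : List String) (i : Int) (hi : 0 ≤ i) :
    (PySem.List.pyRange 0 (i+1) 1).map (fun k => PySem.List.pyGetD (x::xs) k "")
      = x :: (PySem.List.pyRange 0 i 1).map (fun k => PySem.List.pyGetD xs k "") := by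
  obtain ⟨a, rfl⟩ := Int.eq_ofNat_of_zero_le hi
  rw [PySem.List.pyRange_zero]
  have e : ((a : Int) + 1) = ((a + 1 : Nat) : Int) := by push_cast; ring
  rw [e, PySem.List.pyRange_zero]
  simp only [Int.toNat_natCast, List.range_succ_eq_map, List.map_cons, List.map_map]
  congr 1
  · simp [List.getD]
  · apply List.map_congr_left
    intro t _
    have e2 : ((Nat.succ t : Nat) : Int) = ((t : Nat) : Int) + 1 := by push_cast; omega
    simp only [Function.comp_apply, e2]
    rw [pyGetD_cons_shift x xs _ (by omega)]

-- B's walker, characterised in the indexed form Bblock (j = index of the partner in rest)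
theorem altGo_eq (fuel : Nat) (head : String) (np : Int) :
    ∀ (remaining seen : List String),
      altGo fuel head np seen remaining =
        (PySem.List.pyRange 0 (remaining.length : Int) 1).flatMap (fun j =>
          (altCore fuel
              (seen ++ (PySem.List.slice remaining none (some j) ++
                        PySem.List.slice remaining (some (j+1)) none)) (np - 1)).map
            (fun p => (head ++ "_" ++ PySem.List.pyGetD remaining j "") :: p)) := by
  intro remaining
  induction remaining with
  | nil =>
    intro seen
    simp [altGo, PySem.List.pyRange_one_eq_nil]
  | cons y ys ih =>
    intro seen
    have hm : ((y::ys).length : Int) = (ys.length : Int) + 1 := by simp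
    rw [hm, PySem.List.pyRange_one_cons (by omega : (0:Int) < (ys.length : Int) + 1),
        List.flatMap_cons]
    rw [show ((0:Int)+1) = 0 + 1 by ring, pyRange_shift 0 (ys.length : Int), List.flatMap_map]
    simp only [altGo]
    congr 1
    · -- j = 0: pairing the walker's current element y
      rw [slice_shift_tail y ys 0 (le_refl _)]
      simp [PySem.List.pyGetD_zero_cons, PySem.List.slice]
    · -- j ≥ 1: handled by the walker's recursive call with seen ++ [y]
      rw [ih (seen ++ [y])]
      apply List.flatMap_congr
      intro j hj
      rw [PySem.List.mem_pyRange_one] at hj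
      rw [slice_shift_take y ys j hj.1, slice_shift_tail y ys (j+1) (by omega),
          pyGetD_cons_shift y ys j hj.1]
      simp

theorem B_unfold (fuel : Nat) (x : String) (xs : List String) (np : Int) (h0 : ¬ np = 0) :
    altCore (fuel + 1) (x :: xs) np =
      (PySem.List.pyRange 0 (xs.length : Int) 1).flatMap (fun j => Bblock xs np fuel x j)
        ++ (altCore fuel xs np).map (fun p => x :: p) := by
  simp only [altCore, if_neg h0]
  rw [altGo_eq fuel x np xs []]
  simp [Bblock]

-- length of the list A recurses on (two elements removed)
theorem sublen_le (exams : List String) (i j : Int) (h0 : 0 ≤ i) (hij : i + 1 ≤ j) (hj : j < (exams.length : Int)) :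
    (PySem.List.slice exams (some (i+1)) (some j) ++ PySem.List.slice exams (some (j+1)) none).length + 2
      ≤ exams.length := by
  simp only [PySem.List.slice, PySem.List.clampIdx, List.length_append, List.length_take, List.length_drop]
  split_ifs <;> omega

-- length of the list B recurses on (one element removed)
theorem bsublen_le (rest : List String) (j : Int) (h0 : 0 ≤ j) (hj : j < (rest.length : Int)) :
    (PySem.List.slice rest none (some j) ++ PySem.List.slice rest (some (j+1)) none).length + 1
      ≤ rest.length := by
  simp only [PySem.List.slice, PySem.List.clampIdx, List.length_append, List.length_take, List.length_drop]
  split_ifs <;> omega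

-- pairCore ignores the exact fuel once it exceeds the list length
theorem pairCore_fuel : ∀ (n f g : Nat) (exams : List String) (np : Int),
    exams.length ≤ n → exams.length < f → exams.length < g →
    pairCore f exams np = pairCore g exams np := by
  intro n
  induction n with
  | zero =>
    intro f g exams np hn hf hg
    have hx : exams = [] := List.eq_nil_of_length_eq_zero (by omega)
    subst hx
    match f, g, hf, hg with
    | f+1, g+1, _, _ =>
      by_cases h0 : np = 0
      · simp [pairCore, h0]
      · rw [A_unfold f [] np h0, A_unfold g [] np h0]
        simp
  | succ n ih =>
    intro f g exams np hn hf hg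
    match f, g, hf, hg with
    | f+1, g+1, hf, hg =>
      by_cases h0 : np = 0
      · simp [pairCore, h0]
      · rw [A_unfold f exams np h0, A_unfold g exams np h0]
        apply List.flatMap_congr
        intro i hi
        apply List.flatMap_congr
        intro j hj
        rw [PySem.List.mem_pyRange_one] at hi hj
        have hsub := sublen_le exams i j hi.1 hj.1 hj.2
        unfold Ablock
        rw [ih f g _ (np - 1) (by omega) (by omega) (by omega)]

-- the shift of A's inner block over a cons: everything moves one index up
theorem Ablock_shift (x : String) (xs : List String) (np : Int) (fuel : Nat) (i j : Int)
    (hi : 0 ≤ i) (hj : 0 ≤ j) :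
    Ablock (x::xs) np fuel (i+1) (j+1) = (Ablock xs np fuel i j).map (fun p => x :: p) := by
  unfold Ablock
  rw [slice_shift_seg x xs (i+1) j (by omega) hj, slice_shift_tail x xs (j+1) (by omega),
      pyGetD_cons_shift x xs i hi, pyGetD_cons_shift x xs j hj, prefix_shift x xs i hi]
  simp [List.map_map, Function.comp]

-- main induction: the two cores agree whenever the fuel exceeds the list length
theorem core_eq : ∀ (n : Nat) (exams : List String) (np : Int) (f : Nat),
    exams.length ≤ n → exams.length < f →
    pairCore f exams np = altCore f exams np := by
  intro n
  induction n with
  | zero =>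
    intro exams np f hn hf
    have hx : exams = [] := List.eq_nil_of_length_eq_zero (by omega)
    subst hx
    match f, hf with
    | f+1, _ =>
      by_cases h0 : np = 0
      · simp [pairCore, altCore, h0]
      · rw [A_unfold f [] np h0]
        simp [altCore, h0]
  | succ n ih =>
    intro exams np f hn hf
    cases exams with
    | nil =>
      match f, hf with
      | f+1, _ =>
        by_cases h0 : np = 0
        · simp [pairCore, altCore, h0]
        · rw [A_unfold f [] np h0]
          simp [altCore, h0]
    | cons x xs =>
      match f, hf with
      | f+1, hf =>
        by_cases h0 : np = 0
        · simp [pairCore, altCore, h0]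
        · rw [A_unfold f (x::xs) np h0, B_unfold f x xs np h0]
          have hm : ((x::xs).length : Int) = (xs.length : Int) + 1 := by
            simp
          rw [hm]
          rw [PySem.List.pyRange_one_cons (by omega : (0:Int) < (xs.length : Int) + 1)]
          rw [List.flatMap_cons]
          have hlen : xs.length ≤ n := by simp at hn; omega
          have hflen : xs.length < f := by simp at hf; omega
          congr 1
          · -- i = 0 block equals B's walker over the partners of the head
            rw [show ((0:Int)+1) = 0 + 1 by ring]
            rw [pyRange_shift 0 (xs.length : Int), List.flatMap_map]
            apply List.flatMap_congr
            intro j hj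
            rw [PySem.List.mem_pyRange_one] at hj
            unfold Ablock Bblock
            rw [slice_shift_seg x xs 0 j (by omega) hj.1]
            rw [slice_shift_tail x xs (j+1) (by omega)]
            rw [pyGetD_cons_shift x xs j hj.1]
            have hsub := bsublen_le xs j hj.1 hj.2
            simp only [PySem.List.slice_zero_start]
            rw [ih _ (np - 1) f (by omega) (by omega)]
            simp [PySem.List.pyGetD_zero_cons]
          · -- i ≥ 1 blocks equal B's unpaired-head recursion
            rw [← ih xs np f hlen hflen]
            match f, hflen with
            | f+1, hflen =>
              rw [A_unfold f xs np h0]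
              rw [pyRange_shift 0 (xs.length : Int), List.flatMap_map]
              rw [List.map_flatMap]
              apply List.flatMap_congr
              intro i hi
              rw [PySem.List.mem_pyRange_one] at hi
              have e : (i + 1 + 1 : Int) = (i + 1) + 1 := by ring
              rw [e, pyRange_shift (i+1) (xs.length : Int), List.flatMap_map]
              rw [List.map_flatMap]
              apply List.flatMap_congr
              intro j hj
              rw [PySem.List.mem_pyRange_one] at hj
              rw [Ablock_shift x xs np (f+1) i j hi.1 (by omega)]
              congr 1
              unfold Ablock
              have hsub := sublen_le xs i j hi.1 hj.1 hj.2
              rw [pairCore_fuel xs.length (f+1) f _ (np-1) (by omega) (by omega) (by omega)]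

theorem pair_exams_eq_alt : ∀ (exams : List String) (num_pairs : Int),
    pair_exams exams num_pairs = pair_exams_alt exams num_pairs := by
  intro exams np
  unfold pair_exams pair_exams_alt
  exact core_eq exams.length exams np (exams.length + 1) (le_refl _) (by omega)

-- ===== VERDICT (by name: the statement is the Claim_ definition above) =====
theorem pair_exams_spec : Claim_equal_pair_exams := by
  intro exams np _
  unfold Spec_pair_exams
  exact pair_exams_eq_alt exams np
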